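-- pv_equiv track=rewrite | github.com/yongchaoliu/leetcode | 331. Verify Preorder Serialization of a Binary Tree/Accepted-88ms-53444455.py | isValidSerialization
-- ===== SOURCE A (Python) =====
-- import collections
--
-- def isValidSerialization(preorder):
--     """
--     :type preorder: str
--     :rtype: bool
--     """
--     #nodelist=[]
--     nodelist=collections.deque()
--     for node in preorder.split(","):
--     	nodelist.append(node)
--     	while len(nodelist) >=3 and nodelist[-1] == nodelist[-2] == '#' and nodelist[-3] != '#':
--     		nodelist.pop(), nodelist.pop(), nodelist.pop()
--     		nodelist.append('#')
--     return len(nodelist) == 1 and nodelist[0] == '#'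
-- ===== SOURCE B (Python) =====
-- def isValidSerialization(preorder):
--     slots = 1
--     for token in preorder.split(","):
--         if slots == 0:
--             return False
--         slots -= 1
--         if token != '#':
--             slots += 2
--     return slots == 0
-- ===== Notes on version B (the rewrite author's own statement) =====
-- stated objective: simpler
-- what changed: Replaces the deque with a repeated top-collapsing while-loop by a single integer slot counter updated in one pass over the tokens (slots starts at 1, each token consumes one slot, each non-'#' token opens two).
import Mathlib
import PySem

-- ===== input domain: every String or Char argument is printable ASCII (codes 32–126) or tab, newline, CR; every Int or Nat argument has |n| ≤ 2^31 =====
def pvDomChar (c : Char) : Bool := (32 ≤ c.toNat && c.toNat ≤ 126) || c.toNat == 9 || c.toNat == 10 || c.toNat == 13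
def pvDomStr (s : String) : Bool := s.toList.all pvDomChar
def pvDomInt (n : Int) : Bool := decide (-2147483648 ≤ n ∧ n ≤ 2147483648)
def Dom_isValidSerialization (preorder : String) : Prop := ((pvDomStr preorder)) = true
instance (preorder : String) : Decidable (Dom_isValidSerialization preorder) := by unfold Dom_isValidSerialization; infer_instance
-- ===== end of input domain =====

-- B replaces A's deque with repeated top-collapsing by a single slot counter over one pass; simpler, same O(n).

-- ===== PORT A =====
-- The deque is stored top-first (head = nodelist[-1], last = nodelist[0]); append = cons, pop = drop head.
-- pvCollapse is the inner `while` loop: while len >= 3 and top two are '#' and third is not, replace them by '#'.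
def pvCollapse : List String → List String
  | a :: b :: c :: rest =>
      if a = "#" ∧ b = "#" ∧ c ≠ "#" then pvCollapse ("#" :: rest)
      else a :: b :: c :: rest
  | s => s
  termination_by s => s.length

def isValidSerialization (preorder : String) : Bool :=
  let tokens := (PySem.Str.split? preorder ",").getD []   -- sep "," ≠ "" : split? is always `some`
  let nodelist := tokens.foldl (fun s node => pvCollapse (node :: s)) []
  -- len(nodelist) == 1 and nodelist[0] == '#'
  match nodelist with
  | [x] => x == "#"
  | _ => false

-- ===== PORT B =====
-- the `for` loop with early `return False` : a recursion over the tokens carrying `slots`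
def pvSlots : Int → List String → Bool
  | slots, [] => slots == 0
  | slots, token :: rest =>
      if slots = 0 then false
      else pvSlots ((slots - 1) + (if token ≠ "#" then 2 else 0)) rest

def isValidSerialization_alt (preorder : String) : Bool :=
  pvSlots 1 ((PySem.Str.split? preorder ",").getD [])

-- ===== PRECONDITION & SPEC =====
def Spec_isValidSerialization (preorder : String) (out : Bool) : Prop := out = isValidSerialization_alt preorder
instance (preorder : String) (out : Bool) : Decidable (Spec_isValidSerialization preorder out) := by unfold Spec_isValidSerialization; infer_instance

-- ===== CLAIM (what is proved, stated in full; the proofs are below) =====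
def Claim_equal_isValidSerialization : Prop := ∀ (preorder : String), Dom_isValidSerialization preorder → Spec_isValidSerialization preorder (isValidSerialization preorder)

-- ===== LEMMAS AND PROOFS =====

-- weight of a token for slot counting
def pvW (t : String) : Int := if t = "#" then -1 else 1

-- total weight of a stack
def pvWsum : List String → Int
  | [] => 0
  | t :: s => pvW t + pvWsum s

@[simp] theorem pvWsum_nil : pvWsum [] = 0 := rfl
@[simp] theorem pvWsum_cons (t : String) (s : List String) :
    pvWsum (t :: s) = pvW t + pvWsum s := rfl

-- well-formed (fully collapsed, alive) stack, top-first: no "#" at the bottom, no two adjacent "#"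
def pvAlt : List String → Bool
  | [] => true
  | [t] => t ≠ "#"
  | t :: u :: rest => (if t = "#" then u ≠ "#" else true) && pvAlt (u :: rest)

-- unfolding lemmas for the well-founded pvCollapse
theorem pvCollapse_nil : pvCollapse [] = [] := by rw [pvCollapse]; simp
theorem pvCollapse_one (a : String) : pvCollapse [a] = [a] := by rw [pvCollapse]; simp
theorem pvCollapse_two (a b : String) : pvCollapse [a, b] = [a, b] := by rw [pvCollapse]; simp
theorem pvCollapse_cons3 (a b c : String) (rest : List String) :
    pvCollapse (a :: b :: c :: rest) =
      if a = "#" ∧ b = "#" ∧ c ≠ "#" then pvCollapse ("#" :: rest)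
      else a :: b :: c :: rest := by rw [pvCollapse]

theorem pvAlt_tail (t : String) (s : List String) (h : pvAlt (t :: s) = true) :
    pvAlt s = true := by
  cases s with
  | nil => rfl
  | cons u rest => simp only [pvAlt, Bool.and_eq_true] at h; exact h.2

theorem pvAlt_cons_node (t : String) (s : List String) (ht : t ≠ "#") (h : pvAlt s = true) :
    pvAlt (t :: s) = true := by
  cases s with
  | nil => simp [pvAlt, ht]
  | cons u rest => simp only [pvAlt, Bool.and_eq_true]; exact ⟨by simp [ht], h⟩

theorem pvWsum_nonneg : ∀ s : List String, pvAlt s = true →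
    (0 ≤ pvWsum s ∧ (∀ x s', s = x :: s' → x ≠ "#" → 1 ≤ pvWsum s)) := by
  intro s
  induction s using pvAlt.induct with
  | case1 =>
    intro _
    refine ⟨by simp, ?_⟩
    intro x s' h; cases h
  | case2 t =>
    intro h
    simp [pvAlt] at h
    refine ⟨by simp [pvW, h], ?_⟩
    intro x s' he hx
    cases he; simp [pvW, hx]
  | case3 t u rest ih =>
    intro h
    have h2 : pvAlt (u :: rest) = true := pvAlt_tail t _ h
    have ih' := ih h2
    constructor
    · by_cases ht : t = "#"
      · subst ht
        have hu : u ≠ "#" := by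
          simp only [pvAlt, if_true, Bool.and_eq_true] at h
          simpa using h.1
        have := ih'.2 u rest rfl hu
        simp [pvW, hu] at this ⊢; omega
      · have := ih'.1; simp [pvW, ht] at this ⊢; omega
    · intro x s' he hx
      cases he
      have := ih'.1
      simp [pvW, hx] at this ⊢; omega

-- collapse preserves weight-sum; on an alive stack with a '#' pushed it either finishes the tree or stays alive
theorem pvCollapse_hash : ∀ s : List String, pvAlt s = true →
    (pvCollapse ("#" :: s) = ["#"] ∧ pvWsum s = 0) ∨
    (pvAlt (pvCollapse ("#" :: s)) = true ∧
     pvWsum (pvCollapse ("#" :: s)) = pvWsum s - 1 ∧ 1 ≤ pvWsum s)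
  | [], _ => by
    left
    exact ⟨pvCollapse_one "#", rfl⟩
  | [t], h => by
    simp [pvAlt] at h
    right
    rw [pvCollapse_two]
    refine ⟨by simp [pvAlt, h], by simp [pvW, h], by simp [pvW, h]⟩
  | t :: u :: rest, h => by
    have h2 : pvAlt (u :: rest) = true := pvAlt_tail t _ h
    by_cases ht : t = "#"
    · -- top of the stack is '#', the collapse fires once and we recurse on `rest`
      subst ht
      have hu : u ≠ "#" := by
        simp only [pvAlt, if_true, Bool.and_eq_true] at h
        simpa using h.1
      have hrest : pvAlt rest = true := pvAlt_tail u _ h2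
      have step : pvCollapse ("#" :: "#" :: u :: rest) = pvCollapse ("#" :: rest) := by
        rw [pvCollapse_cons3]; simp [hu]
      have hw : pvWsum ("#" :: u :: rest) = pvWsum rest := by simp [pvW, hu]
      rcases pvCollapse_hash rest hrest with ⟨hc, hw0⟩ | ⟨ha, hwc, hge⟩
      · left; rw [step]; exact ⟨hc, by simp [pvW, hu]; omega⟩
      · right; rw [step]
        refine ⟨ha, by simp [pvW, hu] at hwc ⊢; omega, by simp [pvW, hu]; omega⟩
    · -- top is a real node, no collapse
      right
      have step : pvCollapse ("#" :: t :: u :: rest) = "#" :: t :: u :: rest := by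
        rw [pvCollapse_cons3]; simp [ht]
      refine ⟨?_, ?_, ?_⟩
      · rw [step]
        simp only [pvAlt, Bool.and_eq_true] at h ⊢
        exact ⟨by simp [ht], h⟩
      · rw [step]; simp [pvW]; ring
      · exact (pvWsum_nonneg (t :: u :: rest) h).2 t (u :: rest) rfl ht

-- a pushed node that is not '#' never triggers the collapse loop
theorem pvCollapse_node (t : String) (s : List String) (ht : t ≠ "#") :
    pvCollapse (t :: s) = t :: s := by
  cases s with
  | nil => exact pvCollapse_one t
  | cons u rest =>
    cases rest with
    | nil => exact pvCollapse_two t u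
    | cons v rest' => rw [pvCollapse_cons3]; simp [ht]

-- dead stacks ('#' at the bottom under at least one more element) stay dead under collapsing
theorem pvCollapse_dead : ∀ l : List String, 2 ≤ l.length → l.getLast? = some "#" →
    2 ≤ (pvCollapse l).length ∧ (pvCollapse l).getLast? = some "#" := by
  intro l
  induction l using pvCollapse.induct with
  | case1 a b c rest hcond ih =>
    intro _ hlast
    have hrest : rest ≠ [] := by
      intro hr
      subst hr
      simp [List.getLast?] at hlast
      exact hcond.2.2 hlast
    have hlast' : ("#" :: rest).getLast? = some "#" := by
      cases rest with
      | nil => exact absurd rfl hrest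
      | cons v r => simpa [List.getLast?_cons] using hlast
    have hlen' : 2 ≤ ("#" :: rest).length := by
      cases rest with
      | nil => exact absurd rfl hrest
      | cons v r => simp
    have := ih hlen' hlast'
    rw [pvCollapse_cons3]
    simpa [hcond] using this
  | case2 a b c rest hcond =>
    intro h1 h2
    rw [pvCollapse_cons3, if_neg hcond]
    exact ⟨h1, h2⟩
  | case3 s h1 =>
    intro h3 h4
    have : pvCollapse s = s := by
      cases s with
      | nil => exact pvCollapse_nil
      | cons a r =>
        cases r with
        | nil => exact pvCollapse_one a
        | cons b r' =>
          cases r' with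
          | nil => exact pvCollapse_two a b
          | cons c r'' => exact absurd rfl (h1 a b c r'')
    rw [this]
    exact ⟨h3, h4⟩

-- A's fold starting from a dead stack never ends in ['#']
theorem pvDeadRun : ∀ (l : List String) (s : List String),
    2 ≤ s.length → s.getLast? = some "#" →
    (match l.foldl (fun s node => pvCollapse (node :: s)) s with
     | [x] => x == "#" | _ => false) = false := by
  intro l
  induction l with
  | nil =>
    intro s hlen _
    match s, hlen with
    | a :: b :: r, _ => simp
  | cons t rest ih =>
    intro s hlen hlast
    have h' : 2 ≤ (pvCollapse (t :: s)).length ∧ (pvCollapse (t :: s)).getLast? = some "#" := by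
      apply pvCollapse_dead
      · simp; omega
      · cases s with
        | nil => simp at hlen
        | cons u r => simpa [List.getLast?_cons] using hlast
    simpa [List.foldl_cons] using ih _ h'.1 h'.2

-- the main simulation: B's counter run equals A's final stack test, from any related pair of states
theorem pvMain : ∀ (l : List String) (s : List String) (slots : Int),
    ((pvAlt s = true ∧ slots = 1 + pvWsum s) ∨ (s = ["#"] ∧ slots = 0)) →
    pvSlots slots l =
      (match l.foldl (fun s node => pvCollapse (node :: s)) s with
       | [x] => x == "#" | _ => false) := by
  intro l
  induction l with
  | nil =>
    intro s slots h
    rcases h with ⟨ha, hs⟩ | ⟨hs, h0⟩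
    · have hge : 1 ≤ slots := by
        have := (pvWsum_nonneg s ha).1; omega
      have hL : pvSlots slots [] = false := by
        simp [pvSlots]; omega
      rw [hL]
      match s, ha with
      | [], _ => simp
      | [x], ha => simp [pvAlt] at ha; simp [ha]
      | a :: b :: r, _ => simp
    · subst hs; subst h0
      simp [pvSlots]
  | cons t rest ih =>
    intro s slots h
    rcases h with ⟨ha, hs⟩ | ⟨hs, h0⟩
    · have hslots : slots ≠ 0 := by
        have := (pvWsum_nonneg s ha).1; omega
      rw [pvSlots, if_neg hslots]
      by_cases ht : t = "#"
      · subst ht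
        simp only [ne_eq, not_true_eq_false, if_false]
        rcases pvCollapse_hash s ha with ⟨hc, hw0⟩ | ⟨ha', hw', hge⟩
        · simp only [List.foldl_cons, hc]
          rw [show ((slots - 1) + 0 : Int) = 0 by omega]
          exact ih ["#"] 0 (Or.inr ⟨rfl, rfl⟩)
        · simp only [List.foldl_cons]
          exact ih _ _ (Or.inl ⟨ha', by omega⟩)
      · simp only [ne_eq, ht, not_false_eq_true, if_true, List.foldl_cons,
          pvCollapse_node t s ht]
        exact ih _ _ (Or.inl ⟨pvAlt_cons_node t s ht ha, by simp [pvW, ht]; omega⟩)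
    · subst hs; subst h0
      rw [pvSlots, if_pos rfl]
      have hc : pvCollapse [t, "#"] = [t, "#"] := pvCollapse_two t "#"
      rw [List.foldl_cons, hc]
      exact (pvDeadRun rest [t, "#"] (by simp) (by simp [List.getLast?_cons])).symm

-- ===== VERDICT (by name: the statement is the Claim_ definition above) =====
theorem isValidSerialization_spec : Claim_equal_isValidSerialization := by
  intro preorder _
  unfold Spec_isValidSerialization isValidSerialization isValidSerialization_alt
  exact (pvMain ((PySem.Str.split? preorder ",").getD []) [] 1 (Or.inl ⟨rfl, rfl⟩)).symm
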